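-- pv_equiv track=rewrite | github.com/trapwalker/rd | sublayers_server/model/tileid.py | bin2xyz
-- ===== SOURCE A (Python) =====
-- class ETileException(Exception):
--     pass
--
-- def bin2xyz(binary):
--     u"""
--     Преобразование бинарного представления индекса тайла в кортеж (x, y, zoom).
--     Зависит от метода представления тайла в памяти.
--     """
--     b = int(binary)
--     x = y = z = 0
--     while b > 0b11:
--         x = x * 2 + (1 if b & 0b01 else 0)
--         y = y * 2 + (1 if b & 0b10 else 0)
--         z += 1
--         b >>= 2
--     if b != 0b11:
--         raise ETileException(
--             u'Некорректный бинарный формат индекса тайла: {}'.format(bin(binary)))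
--     return x, y, z
-- ===== SOURCE B (Python) =====
-- class ETileException(Exception):
--     pass
--
-- def bin2xyz(binary):
--     b = int(binary)
--     n = b.bit_length()
--     if b < 3 or n % 2 or (b >> (n - 2)) != 3:
--         raise ETileException(
--             u'Некорректный бинарный формат индекса тайла: {}'.format(bin(binary)))
--     z = n // 2 - 1
--     x = sum(((b >> (2 * i)) & 1) << (z - 1 - i) for i in range(z))
--     y = sum(((b >> (2 * i + 1)) & 1) << (z - 1 - i) for i in range(z))
--     return x, y, z
-- ===== Notes on version B (the rewrite author's own statement) =====
-- stated objective: alternative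
-- what changed: Replaced A's sequential two-bits-per-iteration shift loop with mutable (x,y,z) state by a closed-form decode: validate the index via bit_length() and one shift, compute zoom directly from the bit length, and extract the x and y bit-planes as independent per-bit sums.
import Mathlib
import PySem

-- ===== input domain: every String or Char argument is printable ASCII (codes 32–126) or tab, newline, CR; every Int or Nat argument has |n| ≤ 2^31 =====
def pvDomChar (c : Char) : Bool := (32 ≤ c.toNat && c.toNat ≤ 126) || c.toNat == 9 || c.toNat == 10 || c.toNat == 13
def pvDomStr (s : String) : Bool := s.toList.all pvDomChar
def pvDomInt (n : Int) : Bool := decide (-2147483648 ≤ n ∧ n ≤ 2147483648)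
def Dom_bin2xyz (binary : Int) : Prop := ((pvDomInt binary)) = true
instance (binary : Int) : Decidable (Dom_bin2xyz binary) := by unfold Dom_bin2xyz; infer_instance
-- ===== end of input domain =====

-- B replaces A's sequential two-bit shift loop by a closed-form decode: bit_length
-- validation plus independent per-bit extraction sums (objective: alternative).
-- Where A raises ETileException, B raises the same exception; those inputs are outside Pre_.

-- ===== PORT A =====
-- the while loop: state (b, x, y, z); returns the final state.
-- 'b & 0b01' / 'b & 0b10' are PySem.Int.band; 'b >>= 2' is b >>> 2 (arithmetic shift, exact).
def binLoopA (b x y z : Int) : Int × Int × Int × Int :=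
  if 3 < b then
    binLoopA (b >>> (2:Nat))
      (x * 2 + (if PySem.Int.band b 1 ≠ 0 then 1 else 0))
      (y * 2 + (if PySem.Int.band b 2 ≠ 0 then 1 else 0))
      (z + 1)
  else (b, x, y, z)
termination_by b.toNat
decreasing_by
  rename_i h
  rw [Int.shiftRight_eq_div_pow b 2]
  omega

def bin2xyz (binary : Int) : Int × Int × Int :=
  -- b = int(binary) is the identity on an int argument
  let r := binLoopA binary 0 0 0
  if r.1 ≠ 3 then (0, 0, 0)  -- Python raises ETileException here; excluded by Pre_
  else (r.2.1, r.2.2.1, r.2.2.2)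

-- ===== PORT B =====
def bin2xyz_alt (binary : Int) : Int × Int × Int :=
  let b := binary
  let n : Int := (PySem.Int.bitLength b : Int)
  -- on the non-raise path b ≥ 3, hence n ≥ 2, so the .toNat of the shift amounts are exact
  if b < 3 ∨ n % 2 = 1 ∨ b >>> (n - 2).toNat ≠ 3 then (0, 0, 0)  -- Python raises; excluded by Pre_
  else
    let z : Int := n / 2 - 1
    let x := ((PySem.List.pyRange 0 z 1).map
      (fun i => (PySem.Int.band (b >>> (2 * i).toNat) 1) <<< (z - 1 - i).toNat)).sum
    let y := ((PySem.List.pyRange 0 z 1).map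
      (fun i => (PySem.Int.band (b >>> (2 * i + 1).toNat) 1) <<< (z - 1 - i).toNat)).sum
    (x, y, z)

-- ===== PRECONDITION & SPEC =====
-- Pre_ holds exactly where Python's A returns normally: the index reads as '11' followed by
-- an even number of bits, i.e. 3*4^k ≤ binary < 4*4^k for some zoom k.  (The clause
-- 'k < bitLength binary' only makes the ∃ quickly decidable: it is implied by
-- 3*4^k ≤ binary, so it excludes nothing.)  On every input outside Pre_, A raises ETileException, and B raises
-- the same exception with the same message.
def Pre_bin2xyz (binary : Int) : Prop :=
  ∃ k : Nat, k < PySem.Int.bitLength binary ∧ 3 * 4 ^ k ≤ binary ∧ binary < 4 * 4 ^ k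
instance (binary : Int) : Decidable (Pre_bin2xyz binary) := by unfold Pre_bin2xyz; infer_instance
def pvWitness_bin2xyz : Int := 13

def Spec_bin2xyz (binary : Int) (out : Int × Int × Int) : Prop := out = bin2xyz_alt binary
instance (binary : Int) (out : Int × Int × Int) : Decidable (Spec_bin2xyz binary out) := by unfold Spec_bin2xyz; infer_instance

-- ===== CLAIM (what is proved, stated in full; the proofs are below) =====
def Claim_equal_bin2xyz : Prop := ∀ (binary : Int), Dom_bin2xyz binary → Pre_bin2xyz binary → Spec_bin2xyz binary (bin2xyz binary)

-- ===== LEMMAS AND PROOFS =====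

-- the deinterleaved sums B computes, with the zoom level k made explicit (proof-side helper)
def pvS (b : Int) (off k : Nat) : Int :=
  ((List.range k).map (fun i => (PySem.Int.band (b >>> (2 * i + off)) 1) <<< (k - 1 - i))).sum

theorem pv_band_one (b : Int) : PySem.Int.band b 1 = b % 2 := by
  rw [PySem.Int.band_one, PySem.Int.mod_eq_emod_of_pos (by norm_num)]

theorem pv_band_two (b : Int) (hb : 0 ≤ b) :
    PySem.Int.band b 2 = 2 * ((b / 2) % 2) := by
  rw [PySem.Int.band_of_nonneg hb (by norm_num)]
  have h := Nat.and_two_pow b.toNat 1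
  rw [Nat.testBit_eq_decide_div_mod_eq] at h
  show ((b.toNat &&& (2:Int).toNat : Nat) : Int) = 2 * (b / 2 % 2)
  have h2 : (2:Int).toNat = 2 ^ 1 := rfl
  rw [h2, h]
  have h1 : b.toNat / 2 ^ 1 % 2 = 0 ∨ b.toNat / 2 ^ 1 % 2 = 1 := by omega
  rcases h1 with h1 | h1 <;> rw [h1] <;> norm_num <;> omega

theorem pv_shift_shift (b : Int) (m n : Nat) : b >>> (m + n) = (b >>> m) >>> n := by
  rw [Int.shiftRight_eq_div_pow, Int.shiftRight_eq_div_pow, Int.shiftRight_eq_div_pow,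
    Int.ediv_ediv_of_nonneg (by positivity)]
  norm_num [pow_add]

theorem pvS_succ (b : Int) (off k : Nat) :
    pvS b off (k + 1) = (PySem.Int.band (b >>> off) 1) * 2 ^ k + pvS (b >>> (2:Nat)) off k := by
  unfold pvS
  rw [List.range_succ_eq_map, List.map_cons, List.map_map, List.sum_cons]
  congr 1
  · simp [Int.shiftLeft_eq]
  · congr 1
    apply List.map_congr_left
    intro i _
    have e1 : 2 * Nat.succ i + off = 2 + (2 * i + off) := by omega
    have e2 : k + 1 - 1 - Nat.succ i = k - 1 - i := by omega
    simp only [Function.comp_apply, e1, e2, pv_shift_shift b 2 (2 * i + off)]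

theorem loopA_main : ∀ (k : Nat) (b : Int), 3 * 4 ^ k ≤ b → b < 4 * 4 ^ k →
    ∀ x y z : Int, binLoopA b x y z = (3, x * 2 ^ k + pvS b 0 k, y * 2 ^ k + pvS b 1 k, z + k) := by
  intro k
  induction k with
  | zero =>
    intro b h1 h2 x y z
    norm_num at h1 h2
    have hb : b = 3 := by omega
    subst hb
    rw [binLoopA]
    simp [pvS]
  | succ k ih =>
    intro b h1 h2 x y z
    have hK : (1:Int) ≤ 4 ^ k := one_le_pow₀ (by norm_num)
    have hp : (4:Int) ^ (k+1) = 4 * 4 ^ k := by ring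
    rw [hp] at h1 h2
    have hb3 : 3 < b := by nlinarith
    have hb0 : 0 ≤ b := by omega
    have hdiv : b >>> (2:Nat) = b / 4 := by rw [Int.shiftRight_eq_div_pow b 2]; norm_num
    have hd1 : 3 * 4 ^ k ≤ b / 4 := by omega
    have hd2 : b / 4 < 4 * 4 ^ k := by omega
    rw [binLoopA, if_pos hb3, ih _ (by rw [hdiv]; exact hd1) (by rw [hdiv]; exact hd2)]
    have hm2 : b % 2 = 0 ∨ b % 2 = 1 := by omega
    have hm4 : (b/2) % 2 = 0 ∨ (b/2) % 2 = 1 := by omega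
    refine Prod.ext ?_ (Prod.ext ?_ (Prod.ext ?_ ?_)) <;> simp only
    · rw [pvS_succ]
      simp only [Int.shiftRight_eq_div_pow, pow_zero, Nat.cast_one, Int.ediv_one, pv_band_one]
      rcases hm2 with h | h <;> rw [h] <;> push_cast <;> ring
    · rw [pvS_succ]
      have hsh1 : b >>> (1:Nat) = b / 2 := by rw [Int.shiftRight_eq_div_pow b 1]; norm_num
      rw [hsh1, pv_band_one, pv_band_two b hb0]
      rcases hm4 with h | h <;> rw [h] <;> norm_num <;> ring
    · push_cast; ring

theorem pv_bitLength (k : Nat) (b : Int) (h1 : 3 * 4 ^ k ≤ b) (h2 : b < 4 * 4 ^ k) :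
    PySem.Int.bitLength b = 2 * k + 2 := by
  have hK : (1:Int) ≤ 4 ^ k := one_le_pow₀ (by norm_num)
  have hb0 : 0 < b := by nlinarith
  have hub := PySem.Int.lt_two_pow_bitLength b
  have hlb := PySem.Int.two_pow_bitLength_le b (by omega)
  have hna : (b.natAbs : Int) = b := Int.natAbs_of_nonneg hb0.le
  have hcast : (((4:Nat) ^ k : Nat) : Int) = (4:Int) ^ k := by push_cast; ring
  have h1n : 3 * 4 ^ k ≤ b.natAbs := by omega
  have h2n : b.natAbs < 4 * 4 ^ k := by omega
  have e4 : (4:Nat) ^ k = 2 ^ (2 * k) := by rw [pow_mul]; norm_num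
  rw [e4] at h1n h2n
  set L := PySem.Int.bitLength b with hL
  have hlt : 2 ^ (2 * k + 1) < 2 ^ L := by
    calc 2 ^ (2 * k + 1) = 2 * 2 ^ (2*k) := by ring
    _ ≤ b.natAbs := by omega
    _ < 2 ^ L := hub
  have hlt2 : 2 ^ (L - 1) < 2 ^ (2 * k + 2) := by
    calc 2 ^ (L-1) ≤ b.natAbs := hlb
    _ < 4 * 2 ^ (2*k) := h2n
    _ = 2 ^ (2*k+2) := by ring
  have g1 := (Nat.pow_lt_pow_iff_right (a := 2) (by norm_num)).1 hlt
  have g2 := (Nat.pow_lt_pow_iff_right (a := 2) (by norm_num)).1 hlt2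
  omega

theorem B_eval (k : Nat) (b : Int) (h1 : 3 * 4 ^ k ≤ b) (h2 : b < 4 * 4 ^ k) :
    bin2xyz_alt b = (pvS b 0 k, pvS b 1 k, (k : Int)) := by
  have hK : (1:Int) ≤ 4 ^ k := one_le_pow₀ (by norm_num)
  have hK0 : (0:Int) < 4 ^ k := by omega
  have hb3 : ¬ (b < 3) := by nlinarith
  have hbl := pv_bitLength k b h1 h2
  have hn : ((PySem.Int.bitLength b : Nat) : Int) = 2 * (k:Int) + 2 := by rw [hbl]; push_cast; ring
  have hmod : ¬ ((2 * (k:Int) + 2) % 2 = 1) := by omega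
  have htn : ((2 * (k:Int) + 2) - 2).toNat = 2 * k := by omega
  have hcast2 : (((2:Nat) ^ (2 * k) : Nat) : Int) = (4:Int) ^ k := by
    push_cast; rw [pow_mul]; norm_num
  have hshift : b >>> (2 * k) = 3 := by
    rw [Int.shiftRight_eq_div_pow, hcast2]
    have ha : (3:Int) ≤ b / 4 ^ k := (Int.le_ediv_iff_mul_le hK0).2 (by linarith)
    have hb' : b / 4 ^ k < 4 := (Int.ediv_lt_iff_lt_mul hK0).2 (by linarith)
    omega
  have hz : (2 * (k:Int) + 2) / 2 - 1 = (k:Int) := by omega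
  simp only [bin2xyz_alt, hn, htn, hz, hshift, hmod]
  rw [if_neg (by simp [hb3])]
  refine Prod.ext ?_ (Prod.ext ?_ rfl) <;> simp only
  · rw [PySem.List.pyRange_zero_natCast, List.map_map]
    unfold pvS
    apply congrArg
    apply List.map_congr_left
    intro j _
    have e1 : ((2 * (j:Int))).toNat = 2 * j + 0 := by omega
    have e2 : ((k:Int) - 1 - (j:Int)).toNat = k - 1 - j := by omega
    simp only [Function.comp_apply, e1, e2, Int.shiftRight_natCast_right]
  · rw [PySem.List.pyRange_zero_natCast, List.map_map]
    unfold pvS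
    apply congrArg
    apply List.map_congr_left
    intro j _
    have e1 : ((2 * (j:Int) + 1)).toNat = 2 * j + 1 := by omega
    have e2 : ((k:Int) - 1 - (j:Int)).toNat = k - 1 - j := by omega
    simp only [Function.comp_apply, e1, e2, Int.shiftRight_natCast_right]

-- ===== VERDICT (by name: the statement is the Claim_ definition above) =====
theorem bin2xyz_spec : Claim_equal_bin2xyz := by
  intro b _ hpre
  obtain ⟨k, -, h1, h2⟩ := hpre
  show bin2xyz b = bin2xyz_alt b
  rw [bin2xyz, B_eval k b h1 h2]
  simp only [loopA_main k b h1 h2 0 0 0]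
  norm_num
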